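-- pv_equiv track=rewrite | github.com/Dpcrack22/2024-25 | Programacion/Programacion de repaso/Repaso 9 Recursividad.py | vectores_iguales
-- ===== SOURCE A (Python) =====
-- def vectores_iguales(v1,v2):
--     resultado = True
--     if len(v1) != len(v2):
--         resultado = False
--     if len(v1) == 0 or len(v2) == 0:
--         resultado = True
--     elif v1[0] != v2[0]:
--         resultado = False
--     else:
--         resultado = vectores_iguales(v1[1:], v2[1:])
--     return resultado
-- ===== SOURCE B (Python) =====
-- def vectores_iguales(v1, v2):
--     return v1 == v2
-- ===== Notes on version B (the rewrite author's own statement) =====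
-- stated objective: simpler
-- what changed: Replaced the O(n^2) recursion over list slices by a direct whole-list equality test, fixing the prefix-only comparison.
-- intended difference: On pairs of different length whose shorter list is a prefix of the longer (e.g. [1] vs [1,2]), A returns True because its length check is overwritten; B returns False, the intended answer for vector equality. — e.g. on vectores_iguales([1], [1, 2]): A returns true, B returns false
import Mathlib
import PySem

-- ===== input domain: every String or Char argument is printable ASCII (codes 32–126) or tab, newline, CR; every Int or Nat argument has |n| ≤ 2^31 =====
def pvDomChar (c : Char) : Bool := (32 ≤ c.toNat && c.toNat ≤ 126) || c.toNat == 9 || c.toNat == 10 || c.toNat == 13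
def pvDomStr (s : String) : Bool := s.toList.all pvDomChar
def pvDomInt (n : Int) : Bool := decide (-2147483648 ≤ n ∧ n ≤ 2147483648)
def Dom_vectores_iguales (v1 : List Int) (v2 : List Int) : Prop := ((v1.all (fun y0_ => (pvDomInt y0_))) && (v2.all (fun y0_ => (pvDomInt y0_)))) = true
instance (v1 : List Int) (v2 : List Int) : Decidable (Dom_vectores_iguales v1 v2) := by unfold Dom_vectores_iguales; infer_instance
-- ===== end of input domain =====

-- B replaces A's O(n^2) slice recursion by a direct whole-list equality test; A's
-- prefix-only True on length-mismatched inputs is documented as D_ below.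

-- ===== PORT A =====
-- Literal port of A's recursion. A's first two 'resultado' assignments are dead
-- (always overwritten by the second if/elif/else), so the returned value is the
-- second if-chain: empty → True, heads differ → False, else recurse on the tails.
def vectores_iguales (v1 : List Int) (v2 : List Int) : Bool :=
  match v1, v2 with
  | [], _ => true                                  -- len(v1) == 0
  | _, [] => true                                  -- len(v2) == 0
  | a :: t1, b :: t2 =>
    if a ≠ b then false                            -- v1[0] != v2[0]
    else vectores_iguales t1 t2                    -- vectores_iguales(v1[1:], v2[1:])

-- ===== PORT B =====
def vectores_iguales_alt (v1 : List Int) (v2 : List Int) : Bool :=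
  v1 == v2

-- ===== PRECONDITION & SPEC =====
-- On pairs of different length whose shorter list is a prefix of the longer, A returns
-- True (its length check is overwritten); B returns False, the intended answer for
-- vector equality.
def D_vectores_iguales (v1 : List Int) (v2 : List Int) : Prop :=
  v1.length ≠ v2.length ∧ (v1 <+: v2 ∨ v2 <+: v1)
instance (v1 : List Int) (v2 : List Int) : Decidable (D_vectores_iguales v1 v2) := by
  unfold D_vectores_iguales; infer_instance

def Spec_vectores_iguales (v1 : List Int) (v2 : List Int) (out : Bool) : Prop :=
  ¬ D_vectores_iguales v1 v2 → out = vectores_iguales_alt v1 v2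
instance (v1 : List Int) (v2 : List Int) (out : Bool) : Decidable (Spec_vectores_iguales v1 v2 out) := by
  unfold Spec_vectores_iguales; infer_instance

def pvDiffWitness_vectores_iguales : List Int × List Int := ([1], [1, 2])
def pvDiffWitnessOut_vectores_iguales : Bool × Bool := (true, false)

-- ===== CLAIM (what is proved, stated in full; the proofs are below) =====
def Claim_unchanged_vectores_iguales : Prop := ∀ (v1 : List Int) (v2 : List Int), Dom_vectores_iguales v1 v2 → Spec_vectores_iguales v1 v2 (vectores_iguales v1 v2)
def Claim_changed_vectores_iguales : Prop := Dom_vectores_iguales (pvDiffWitness_vectores_iguales.1) (pvDiffWitness_vectores_iguales.2) ∧ D_vectores_iguales (pvDiffWitness_vectores_iguales.1) (pvDiffWitness_vectores_iguales.2) ∧ vectores_iguales (pvDiffWitness_vectores_iguales.1) (pvDiffWitness_vectores_iguales.2) = pvDiffWitnessOut_vectores_iguales.1 ∧ vectores_iguales_alt (pvDiffWitness_vectores_iguales.1) (pvDiffWitness_vectores_iguales.2) = pvDiffWitnessOut_vectores_iguales.2 ∧ pvDiffWitnessOut_vectores_iguales.1 ≠ pvDiffWitnessOut_vectores_iguales.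2
def Claim_exact_vectores_iguales : Prop := ∀ (v1 : List Int) (v2 : List Int), Dom_vectores_iguales v1 v2 → D_vectores_iguales v1 v2 → vectores_iguales v1 v2 ≠ vectores_iguales_alt v1 v2

-- ===== LEMMAS AND PROOFS =====

-- A returns true exactly when one list is a prefix of the other.
theorem vectores_iguales_eq_true_iff (v1 v2 : List Int) :
    vectores_iguales v1 v2 = true ↔ (v1 <+: v2 ∨ v2 <+: v1) := by
  induction v1 generalizing v2 with
  | nil => simp [vectores_iguales]
  | cons a t1 ih =>
    cases v2 with
    | nil => simp [vectores_iguales]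
    | cons b t2 =>
      by_cases h : a = b
      · subst h
        simp [vectores_iguales, ih, List.cons_prefix_cons]
      · simp only [vectores_iguales, if_pos (by exact h), List.cons_prefix_cons]
        constructor
        · intro hf; exact absurd hf (by simp)
        · rintro (⟨hab, _⟩ | ⟨hba, _⟩)
          · exact absurd hab h
          · exact absurd hba.symm h

-- ===== VERDICT (by name: the statement is the Claim_ definition above) =====
theorem vectores_iguales_spec : Claim_unchanged_vectores_iguales := by
  intro v1 v2 _ hD
  unfold D_vectores_iguales at hD
  push_neg at hD
  unfold vectores_iguales_alt
  by_cases heq : v1 = v2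
  · subst heq
    simp [vectores_iguales_eq_true_iff]
  · have hne : (v1 == v2) = false := by simp [heq]
    rw [hne]
    by_cases hlen : v1.length = v2.length
    · -- equal lengths, unequal lists: neither is a prefix of the other
      rw [← Bool.not_eq_true, vectores_iguales_eq_true_iff]
      rintro (h | h)
      · exact heq (List.IsPrefix.eq_of_length h hlen)
      · exact heq (List.IsPrefix.eq_of_length h hlen.symm).symm
    · have := hD hlen
      rw [← Bool.not_eq_true, vectores_iguales_eq_true_iff]
      rw [not_or]; exact this

theorem vectores_iguales_changed : Claim_changed_vectores_iguales := by
  unfold Claim_changed_vectores_iguales; decide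

theorem vectores_iguales_tight : Claim_exact_vectores_iguales := by
  intro v1 v2 _ hD
  obtain ⟨hlen, hpre⟩ := hD
  have hA : vectores_iguales v1 v2 = true := (vectores_iguales_eq_true_iff v1 v2).mpr hpre
  have hB : vectores_iguales_alt v1 v2 = false := by
    unfold vectores_iguales_alt
    simp only [beq_eq_false_iff_ne, ne_eq]
    intro h; exact hlen (by rw [h])
  rw [hA, hB]; simp
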